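-- pv_equiv track=rewrite | github.com/mdMaikon/Mesa-Premium | fastapi/scripts/security_audit.py | _get_package_severity
-- ===== SOURCE A (Python) =====
-- from typing import Dict, List, Any, Tuple
--
-- def _get_package_severity(vulns: List[Dict]) -> str:
--     """Determine highest severity level for package vulnerabilities"""
--     # Simple heuristic based on CVE keywords and vulnerability descriptions
--     severity_keywords = {
--         "critical": ["remote code execution", "rce", "arbitrary code", "privilege escalation"],
--         "high": ["xss", "csrf", "sql injection", "authentication bypass", "dos", "denial of service"],
--         "medium": ["information disclosure", "path traversal", "redirect"],
--         "low": ["deprecation", "minor"]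
--     }
--
--     highest = "low"
--     for vuln in vulns:
--         description = vuln.get("description", "").lower()
--
--         for severity, keywords in severity_keywords.items():
--             if any(keyword in description for keyword in keywords):
--                 if severity == "critical":
--                     return "critical"
--                 elif severity == "high" and highest != "critical":
--                     highest = "high"
--                 elif severity == "medium" and highest not in ["critical", "high"]:
--                     highest = "medium"
--
--     return highest
-- ===== SOURCE B (Python) =====
-- from typing import Dict, List, Any, Tuple
--
-- _LEVELS = [
--     ("critical", ["remote code execution", "rce", "arbitrary code", "privilege escalation"]),
--     ("high", ["xss", "csrf", "sql injection", "authentication bypass", "dos", "denial of service"]),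
--     ("medium", ["information disclosure", "path traversal", "redirect"]),
-- ]
--
-- def _get_package_severity(vulns: List[Dict]) -> str:
--     # Stage 1: collect all lowered descriptions once.
--     descriptions = [v.get("description", "").lower() for v in vulns]
--     # Stage 2: try severities from most to least severe; return the first
--     # level whose keywords occur anywhere in the corpus.
--     for name, keywords in _LEVELS:
--         if any(k in d for d in descriptions for k in keywords):
--             return name
--     return "low"
-- ===== Notes on version B (the rewrite author's own statement) =====
-- stated objective: simpler
-- what changed: Inverts the loop nesting: instead of a single pass over vulns maintaining a guarded running 'highest', B first collects all lowered descriptions, then tries severities in decreasing order and returns the first level whose keywords match anywhere in the corpus; no accumulator, no max, no early-critical special case.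
import Mathlib
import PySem

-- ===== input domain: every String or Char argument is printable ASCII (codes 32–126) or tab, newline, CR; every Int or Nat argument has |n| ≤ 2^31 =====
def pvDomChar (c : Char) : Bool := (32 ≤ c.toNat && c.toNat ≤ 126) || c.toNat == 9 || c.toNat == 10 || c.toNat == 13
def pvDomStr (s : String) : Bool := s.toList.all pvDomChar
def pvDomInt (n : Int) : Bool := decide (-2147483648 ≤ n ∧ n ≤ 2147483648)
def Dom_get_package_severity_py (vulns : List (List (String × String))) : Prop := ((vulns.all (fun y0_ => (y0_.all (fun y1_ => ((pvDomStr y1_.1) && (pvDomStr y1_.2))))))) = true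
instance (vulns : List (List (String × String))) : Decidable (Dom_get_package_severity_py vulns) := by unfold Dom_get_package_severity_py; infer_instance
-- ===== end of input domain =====

-- B inverts A's loop nesting: it collects all lowered descriptions once, then tries severities
-- in decreasing order and returns the first level matched anywhere (no accumulator, no early return).


-- shared literal keyword lists (the same string literals appear in Source A and Source B)
def kwCritical : List String := ["remote code execution", "rce", "arbitrary code", "privilege escalation"]
def kwHigh : List String := ["xss", "csrf", "sql injection", "authentication bypass", "dos", "denial of service"]
def kwMedium : List String := ["information disclosure", "path traversal", "redirect"]
def kwLow : List String := ["deprecation", "minor"]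

-- ===== PORT A =====
-- severity_keywords.items(), in insertion order
def sevItems : List (String × List String) := [("critical", kwCritical), ("high", kwHigh), ("medium", kwMedium), ("low", kwLow)]

-- the inner 'for severity, keywords in …' loop; Sum.inl = early 'return "critical"', Sum.inr = updated 'highest'
def aInner (desc highest : String) : List (String × List String) → Sum String String
  | [] => Sum.inr highest
  | (sev, kws) :: rest =>
    if kws.any (fun k => PySem.Str.isIn k desc) then
      if sev == "critical" then Sum.inl "critical"
      else if sev == "high" && !(highest == "critical") then aInner desc "high" rest
      else if sev == "medium" && !(highest == "critical" || highest == "high") then aInner desc "medium" rest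
      else aInner desc highest rest
    else aInner desc highest rest

def aLoop : List (List (String × String)) → String → String
  | [], highest => highest
  | v :: rest, highest =>
    let desc := PySem.Str.lower ((PySem.Dict.mk v).getD "description" "")
    match aInner desc highest sevItems with
    | Sum.inl r => r
    | Sum.inr h => aLoop rest h

def get_package_severity_py (vulns : List (List (String × String))) : String :=
  aLoop vulns "low"

-- ===== PORT B =====
def bLevels : List (String × List String) := [("critical", kwCritical), ("high", kwHigh), ("medium", kwMedium)]

-- Stage 1 of Source B: the list comprehension of lowered descriptions
def bDescs (vulns : List (List (String × String))) : List String :=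
  vulns.map (fun v => PySem.Str.lower ((PySem.Dict.mk v).getD "description" ""))

-- Stage 2 of Source B: 'for name, keywords in _LEVELS: if any(...): return name' / default "low"
def bScan (descs : List String) : List (String × List String) → String
  | [] => "low"
  | (name, kws) :: rest =>
    if descs.any (fun d => kws.any (fun k => PySem.Str.isIn k d)) then name
    else bScan descs rest

def get_package_severity_py_alt (vulns : List (List (String × String))) : String :=
  bScan (bDescs vulns) bLevels

-- ===== PRECONDITION & SPEC =====
def Spec_get_package_severity_py (vulns : List (List (String × String))) (out : String) : Prop := out = get_package_severity_py_alt vulns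
instance (vulns : List (List (String × String))) (out : String) : Decidable (Spec_get_package_severity_py vulns out) := by unfold Spec_get_package_severity_py; infer_instance

-- ===== CLAIM (what is proved, stated in full; the proofs are below) =====
def Claim_equal_get_package_severity_py : Prop := ∀ (vulns : List (List (String × String))), Dom_get_package_severity_py vulns → Spec_get_package_severity_py vulns (get_package_severity_py vulns)

-- ===== LEMMAS AND PROOFS =====

-- numeric rank of a description / of a 'highest' string, and the name table
def sevRank (desc : String) : Nat :=
  if kwCritical.any (fun k => PySem.Str.isIn k desc) then 3
  else if kwHigh.any (fun k => PySem.Str.isIn k desc) then 2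
  else if kwMedium.any (fun k => PySem.Str.isIn k desc) then 1
  else 0

def rk (s : String) : Nat :=
  if s = "critical" then 3 else if s = "high" then 2 else if s = "medium" then 1 else 0

def sevNames : List String := ["low", "medium", "high", "critical"]

def descOf (v : List (String × String)) : String :=
  PySem.Str.lower ((PySem.Dict.mk v).getD "description" "")

lemma sevRank_le (desc : String) : sevRank desc ≤ 3 := by
  unfold sevRank; split_ifs <;> omega

lemma aInner_eq (desc h : String) (hh : h = "low" ∨ h = "medium" ∨ h = "high") :
    aInner desc h sevItems =
      if sevRank desc = 3 then Sum.inl "critical"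
      else Sum.inr (sevNames.getD (max (rk h) (sevRank desc)) "") := by
  rcases hh with rfl | rfl | rfl <;>
  · by_cases hc : ∃ x ∈ kwCritical, PySem.Chars.isIn x.toList desc.toList = true <;>
    by_cases hg : ∃ x ∈ kwHigh, PySem.Chars.isIn x.toList desc.toList = true <;>
    by_cases hm : ∃ x ∈ kwMedium, PySem.Chars.isIn x.toList desc.toList = true <;>
    by_cases hl : ∃ x ∈ kwLow, PySem.Chars.isIn x.toList desc.toList = true <;>
    simp [aInner, sevItems, sevRank, rk, sevNames, hc, hg, hm, hl]

lemma foldl_max_three (l : List (List (String × String))) :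
    l.foldl (fun b v => max b (sevRank (descOf v))) 3 = 3 := by
  induction l with
  | nil => rfl
  | cons v t ih =>
    have := sevRank_le (descOf v)
    simp only [List.foldl_cons]
    rw [Nat.max_eq_left this, ih]

lemma aLoop_eq (vulns : List (List (String × String))) (h : String)
    (hh : h = "low" ∨ h = "medium" ∨ h = "high") :
    aLoop vulns h =
      sevNames.getD (vulns.foldl (fun b v => max b (sevRank (descOf v))) (rk h)) "" := by
  induction vulns generalizing h with
  | nil =>
    rcases hh with rfl | rfl | rfl <;> rfl
  | cons v t ih =>
    have hstep : aLoop (v :: t) h =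
        match aInner (descOf v) h sevItems with
        | Sum.inl r => r
        | Sum.inr h' => aLoop t h' := rfl
    rw [hstep, List.foldl_cons, aInner_eq (descOf v) h hh]
    by_cases h3 : sevRank (descOf v) = 3
    · have hrk : rk h ≤ 3 := by rcases hh with rfl | rfl | rfl <;> simp [rk]
      rw [if_pos h3, h3, Nat.max_eq_right hrk, foldl_max_three]
      rfl
    · rw [if_neg h3]
      have hm2 : max (rk h) (sevRank (descOf v)) ≤ 2 := by
        have := sevRank_le (descOf v)
        have hrk : rk h ≤ 2 := by rcases hh with rfl | rfl | rfl <;> simp [rk]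
        omega
      set m := max (rk h) (sevRank (descOf v)) with hm
      have hname : sevNames.getD m "" = "low" ∨ sevNames.getD m "" = "medium" ∨
          sevNames.getD m "" = "high" := by
        interval_cases m <;> simp [sevNames]
      have hrk2 : rk (sevNames.getD m "") = m := by
        interval_cases m <;> rfl
      have hred : (match (Sum.inr (sevNames.getD m "") : Sum String String) with
          | Sum.inl r => r
          | Sum.inr h' => aLoop t h') = aLoop t (sevNames.getD m "") := rfl
      rw [hred, ih _ hname, hrk2]

-- folding max over Nat: bounds
lemma init_le_foldl_max (l : List Nat) : ∀ a, a ≤ l.foldl max a := by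
  induction l with
  | nil => intro a; exact le_refl a
  | cons y t ih => intro a; exact le_trans (le_max_left a y) (ih _)

lemma mem_le_foldl_max (l : List Nat) (x : Nat) (hx : x ∈ l) : ∀ a, x ≤ l.foldl max a := by
  induction l with
  | nil => cases hx
  | cons y t ih =>
    intro a
    rcases List.mem_cons.mp hx with rfl | hx'
    · exact le_trans (le_max_right a x) (init_le_foldl_max t _)
    · exact ih hx' _

lemma foldl_max_le (l : List Nat) (k : Nat) (h : ∀ x ∈ l, x ≤ k) :
    ∀ a, a ≤ k → l.foldl max a ≤ k := by
  induction l with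
  | nil => intro a ha; exact ha
  | cons y t ih =>
    intro a ha
    exact ih (fun x hx => h x (List.mem_cons_of_mem _ hx)) _ (max_le ha (h y List.mem_cons_self))

-- two Bool bridges used repeatedly below
lemma not_exists_any (descs kws : List String)
    (h : ¬∃ d ∈ descs, kws.any (fun k => PySem.Str.isIn k d) = true) :
    ∀ d ∈ descs, kws.any (fun k => PySem.Str.isIn k d) = false := by
  intro d hd
  rcases Bool.eq_false_or_eq_true (kws.any (fun k => PySem.Str.isIn k d)) with ht | hf
  · exact absurd ⟨d, hd, ht⟩ h
  · exact hf

lemma any_any_false (descs kws : List String)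
    (h : ∀ d ∈ descs, kws.any (fun k => PySem.Str.isIn k d) = false) :
    descs.any (fun d => kws.any (fun k => PySem.Str.isIn k d)) = false := by
  rcases Bool.eq_false_or_eq_true (descs.any (fun d => kws.any (fun k => PySem.Str.isIn k d))) with ht | hf
  · obtain ⟨d, hd, hm⟩ := List.any_eq_true.mp ht
    rw [h d hd] at hm
    cases hm
  · exact hf

-- B's severity-major scan equals the name of the maximal per-description rank
lemma bScan_eq (descs : List String) :
    bScan descs bLevels =
      sevNames.getD ((descs.map sevRank).foldl max 0) "" := by
  by_cases h3 : ∃ d ∈ descs, kwCritical.any (fun k => PySem.Str.isIn k d) = true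
  · obtain ⟨d, hd, hmatch⟩ := h3
    have hr : sevRank d = 3 := by unfold sevRank; rw [if_pos hmatch]
    have h3le : 3 ≤ (descs.map sevRank).foldl max 0 :=
      hr ▸ mem_le_foldl_max _ _ (List.mem_map_of_mem hd) _
    have hle3 : (descs.map sevRank).foldl max 0 ≤ 3 := foldl_max_le _ _ (by
      intro x hx; obtain ⟨d', _, rfl⟩ := List.mem_map.mp hx; exact sevRank_le d') _ (by omega)
    rw [le_antisymm hle3 h3le]
    have hany : descs.any (fun d => kwCritical.any (fun k => PySem.Str.isIn k d)) = true :=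
      List.any_eq_true.mpr ⟨d, hd, hmatch⟩
    simp only [bScan, bLevels]
    rw [if_pos hany]
    rfl
  · have hc := not_exists_any descs kwCritical h3
    have hanyC := any_any_false descs kwCritical hc
    by_cases h2 : ∃ d ∈ descs, kwHigh.any (fun k => PySem.Str.isIn k d) = true
    · obtain ⟨d, hd, hmatch⟩ := h2
      have hr : sevRank d = 2 := by
        unfold sevRank
        rw [hc d hd, if_neg Bool.false_ne_true, if_pos hmatch]
      have h2le : 2 ≤ (descs.map sevRank).foldl max 0 :=
        hr ▸ mem_le_foldl_max _ _ (List.mem_map_of_mem hd) _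
      have hle2 : (descs.map sevRank).foldl max 0 ≤ 2 := foldl_max_le _ _ (by
        intro x hx; obtain ⟨d', hd', rfl⟩ := List.mem_map.mp hx
        unfold sevRank
        rw [hc d' hd', if_neg Bool.false_ne_true]
        split_ifs <;> omega) _ (by omega)
      rw [le_antisymm hle2 h2le]
      have hany : descs.any (fun d => kwHigh.any (fun k => PySem.Str.isIn k d)) = true :=
        List.any_eq_true.mpr ⟨d, hd, hmatch⟩
      simp only [bScan, bLevels]
      rw [if_neg (hanyC ▸ Bool.false_ne_true), if_pos hany]
      rfl
    · have hh := not_exists_any descs kwHigh h2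
      have hanyH := any_any_false descs kwHigh hh
      by_cases h1 : ∃ d ∈ descs, kwMedium.any (fun k => PySem.Str.isIn k d) = true
      · obtain ⟨d, hd, hmatch⟩ := h1
        have hr : sevRank d = 1 := by
          unfold sevRank
          rw [hc d hd, if_neg Bool.false_ne_true, hh d hd, if_neg Bool.false_ne_true,
            if_pos hmatch]
        have h1le : 1 ≤ (descs.map sevRank).foldl max 0 :=
          hr ▸ mem_le_foldl_max _ _ (List.mem_map_of_mem hd) _
        have hle1 : (descs.map sevRank).foldl max 0 ≤ 1 := foldl_max_le _ _ (by
          intro x hx; obtain ⟨d', hd', rfl⟩ := List.mem_map.mp hx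
          unfold sevRank
          rw [hc d' hd', if_neg Bool.false_ne_true, hh d' hd', if_neg Bool.false_ne_true]
          split_ifs <;> omega) _ (by omega)
        rw [le_antisymm hle1 h1le]
        have hany : descs.any (fun d => kwMedium.any (fun k => PySem.Str.isIn k d)) = true :=
          List.any_eq_true.mpr ⟨d, hd, hmatch⟩
        simp only [bScan, bLevels]
        rw [if_neg (hanyC ▸ Bool.false_ne_true), if_neg (hanyH ▸ Bool.false_ne_true),
          if_pos hany]
        rfl
      · have hm := not_exists_any descs kwMedium h1
        have hanyM := any_any_false descs kwMedium hm
        have hM0 : (descs.map sevRank).foldl max 0 = 0 := Nat.le_zero.mp (foldl_max_le _ _ (by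
          intro x hx; obtain ⟨d', hd', rfl⟩ := List.mem_map.mp hx
          unfold sevRank
          rw [hc d' hd', if_neg Bool.false_ne_true, hh d' hd', if_neg Bool.false_ne_true,
            hm d' hd', if_neg Bool.false_ne_true]) _ (le_refl 0))
        rw [hM0]
        simp only [bScan, bLevels]
        rw [if_neg (hanyC ▸ Bool.false_ne_true), if_neg (hanyH ▸ Bool.false_ne_true),
          if_neg (hanyM ▸ Bool.false_ne_true)]
        rfl

-- ===== VERDICT (by name: the statement is the Claim_ definition above) =====
theorem get_package_severity_py_spec : Claim_equal_get_package_severity_py := by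
  intro vulns _
  unfold Spec_get_package_severity_py get_package_severity_py get_package_severity_py_alt
  rw [aLoop_eq vulns "low" (Or.inl rfl), bScan_eq]
  have : bDescs vulns = vulns.map descOf := rfl
  rw [this, List.map_map, List.foldl_map]
  rfl
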